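-- pv_equiv track=rewrite | github.com/yasir720/Tabs2XML | Tabs2XML/main.py | isAllStringsSameLength
-- ===== SOURCE A (Python) =====
-- def isAllStringsSameLength(tab):
--   same = True
--   stringLength = 0
--   for s in tab:
--     setS = set(s)
--     if '|' in setS:
--       if stringLength == 0:
--         stringLength = len(s)
--       else:
--         if len(s) != stringLength:
--           same = False;
--           break
--   return same
-- ===== SOURCE B (Python) =====
-- def isAllStringsSameLength(tab):
--   lens = [len(s) for s in tab if '|' in s]
--   return not lens or min(lens) == max(lens)
-- ===== Notes on version B (the rewrite author's own statement) =====
-- stated objective: alternative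
-- what changed: Instead of a stateful scan comparing each '|'-string against a remembered first length with an early break, B first extracts the list of qualifying lengths and then decides equality by the extremal criterion min(lens) == max(lens) (vacuously True when empty); correctness: a multiset of numbers is constant iff its minimum equals its maximum.
import Mathlib
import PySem

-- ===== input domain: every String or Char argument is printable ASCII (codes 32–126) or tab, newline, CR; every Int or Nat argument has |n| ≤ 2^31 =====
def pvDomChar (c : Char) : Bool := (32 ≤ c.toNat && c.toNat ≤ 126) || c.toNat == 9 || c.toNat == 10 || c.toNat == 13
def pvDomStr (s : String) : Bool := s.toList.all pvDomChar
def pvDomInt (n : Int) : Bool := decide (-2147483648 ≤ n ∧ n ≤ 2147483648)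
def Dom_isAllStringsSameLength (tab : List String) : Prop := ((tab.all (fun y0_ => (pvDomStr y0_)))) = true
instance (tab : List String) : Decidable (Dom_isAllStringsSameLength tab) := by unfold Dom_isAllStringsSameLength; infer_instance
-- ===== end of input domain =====

-- B replaces A's stateful first-length/flag/break scan by staged passes: extract the qualifying lengths, then decide constancy by min == max; same O(n) cost.

-- ===== PORT A =====
-- the loop of A: state (same, stringLength); 'break' after 'same = False' returns False
def isAllStringsSameLengthGo (rest : List String) (same : Bool) (stringLength : Int) : Bool :=
  match rest with
  | [] => same
  | s :: rest =>
    let setS := PySem.Set.ofList s.toList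
    if setS.contains '|' then
      if stringLength = 0 then
        isAllStringsSameLengthGo rest same (PySem.Str.len s)
      else
        if PySem.Str.len s ≠ stringLength then false
        else isAllStringsSameLengthGo rest same stringLength
    else isAllStringsSameLengthGo rest same stringLength

def isAllStringsSameLength (tab : List String) : Bool :=
  isAllStringsSameLengthGo tab true 0

-- ===== PORT B =====
def isAllStringsSameLength_alt (tab : List String) : Bool :=
  let lens : List Int := (tab.filter (fun s => PySem.Str.isIn "|" s)).map PySem.Str.len
  lens.isEmpty || decide (PySem.List.min? lens (fun x => x) = PySem.List.max? lens (fun x => x))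

-- ===== PRECONDITION & SPEC =====
def Spec_isAllStringsSameLength (tab : List String) (out : Bool) : Prop := out = isAllStringsSameLength_alt tab
instance (tab : List String) (out : Bool) : Decidable (Spec_isAllStringsSameLength tab out) := by unfold Spec_isAllStringsSameLength; infer_instance

-- ===== CLAIM (what is proved, stated in full; the proofs are below) =====
def Claim_equal_isAllStringsSameLength : Prop := ∀ (tab : List String), Dom_isAllStringsSameLength tab → Spec_isAllStringsSameLength tab (isAllStringsSameLength tab)

-- ===== LEMMAS AND PROOFS =====

-- the list of qualifying lengths B builds
def pvLens (tab : List String) : List Int :=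
  (tab.filter (fun s => PySem.Str.isIn "|" s)).map PySem.Str.len

lemma pvAlt_eq (tab : List String) :
    isAllStringsSameLength_alt tab
      = ((pvLens tab).isEmpty || decide (PySem.List.min? (pvLens tab) (fun x => x) = PySem.List.max? (pvLens tab) (fun x => x))) := rfl

lemma pvLens_cons_pos (s : String) (rest : List String) (h : PySem.Str.isIn "|" s = true) :
    pvLens (s :: rest) = PySem.Str.len s :: pvLens rest := by
  have h' : PySem.Chars.isIn ['|'] s.toList = true := by simpa [PySem.Str.isIn] using h
  simp [pvLens, List.filter_cons, h']

lemma pvLens_cons_neg (s : String) (rest : List String) (h : PySem.Str.isIn "|" s = false) :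
    pvLens (s :: rest) = pvLens rest := by
  have h' : PySem.Chars.isIn ['|'] s.toList = false := by simpa [PySem.Str.isIn] using h
  simp [pvLens, List.filter_cons, h']

-- both ports test the same membership: '|' ∈ set(s)  ⟺  '|' in s
lemma pvQual_iff (s : String) :
    (PySem.Set.ofList s.toList).contains '|' = PySem.Str.isIn "|" s := by
  by_cases h : '|' ∈ s.toList
  · have h1 : (PySem.Set.ofList s.toList).contains '|' = true := by
      simp [PySem.Set.contains, PySem.Set.mem_ofList, h]
    have h2 : PySem.Str.isIn "|" s = true := by
      rw [PySem.Str.isIn_iff_infix]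
      obtain ⟨u, v, huv⟩ := List.append_of_mem h
      exact ⟨u, v, by simp [huv]⟩
    rw [h1, h2]
  · have h1 : (PySem.Set.ofList s.toList).contains '|' = false := by
      simp [PySem.Set.contains, PySem.Set.mem_ofList, h]
    have h2 : PySem.Str.isIn "|" s = false := by
      rw [Bool.eq_false_iff]
      intro hc
      rw [PySem.Str.isIn_iff_infix] at hc
      exact h (hc.subset (by simp))
    rw [h1, h2]

lemma pvLen_pos_of_qual (s : String) (h : PySem.Str.isIn "|" s = true) : 0 < PySem.Str.len s := by
  rw [PySem.Str.isIn_iff_infix] at h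
  have hm : '|' ∈ s.toList := h.subset (by simp)
  rw [PySem.Str.len_eq]
  have := List.length_pos_of_mem hm
  omega

-- min = max on a nonempty list ⟺ every element equals the head
lemma pvMinMax_iff (x : Int) (t : List Int) :
    (PySem.List.min? (x :: t) (fun y => y) = PySem.List.max? (x :: t) (fun y => y))
      ↔ ∀ y ∈ t, y = x := by
  constructor
  · intro h
    cases hm : PySem.List.min? (x :: t) (fun y => y) with
    | none => exact absurd ((PySem.List.min?_eq_none_iff _ _).mp hm) (by simp)
    | some m =>
      rw [hm] at h
      have hmin := PySem.List.min?_isMin hm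
      have hmax := PySem.List.max?_isMax h.symm
      have hx : x = m := le_antisymm (hmax x (by simp)) (hmin x (by simp))
      intro y hy
      have h1 := hmin y (by simp [hy])
      have h2 := hmax y (by simp [hy])
      omega
  · intro h
    cases hm : PySem.List.min? (x :: t) (fun y => y) with
    | none => exact absurd ((PySem.List.min?_eq_none_iff _ _).mp hm) (by simp)
    | some m =>
      cases hM : PySem.List.max? (x :: t) (fun y => y) with
      | none => exact absurd ((PySem.List.max?_eq_none_iff _ _).mp hM) (by simp)
      | some M =>
        have hmmem : m ∈ x :: t := PySem.List.min?_mem hm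
        have hMmem : M ∈ x :: t := PySem.List.max?_mem hM
        have hm' : m = x := by rcases List.mem_cons.mp hmmem with h' | h' <;> [exact h'; exact h m h']
        have hM' : M = x := by rcases List.mem_cons.mp hMmem with h' | h' <;> [exact h'; exact h M h']
        simp [hm', hM']

-- A with a positive sentinel L = "every remaining qualifying length equals L"
lemma pvMain_pos (tab : List String) (L : Int) (hL : 0 < L) :
    isAllStringsSameLengthGo tab true L = decide (∀ y ∈ pvLens tab, y = L) := by
  induction tab with
  | nil => simp [isAllStringsSameLengthGo, pvLens]
  | cons s rest ih =>
    by_cases hq : PySem.Str.isIn "|" s = true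
    · rw [pvLens_cons_pos s rest hq]
      simp only [isAllStringsSameLengthGo, pvQual_iff, hq, if_true]
      have h0 : ¬ (L = 0) := by omega
      by_cases he : ((s.length : Int)) = L
      · simp [h0, PySem.Str.len_eq, he, ih]
      · simp [h0, PySem.Str.len_eq, he]
    · rw [Bool.not_eq_true] at hq
      rw [pvLens_cons_neg s rest hq]
      simp only [isAllStringsSameLengthGo, pvQual_iff, hq, if_false, Bool.false_eq_true]
      exact ih

-- ===== VERDICT (by name: the statement is the Claim_ definition above) =====
theorem isAllStringsSameLength_spec : Claim_equal_isAllStringsSameLength := by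
  intro tab hd
  clear hd
  show isAllStringsSameLength tab = isAllStringsSameLength_alt tab
  rw [isAllStringsSameLength, pvAlt_eq]
  induction tab with
  | nil => simp [isAllStringsSameLengthGo, pvLens]
  | cons s rest ih =>
    by_cases hq : PySem.Str.isIn "|" s = true
    · have hpos := pvLen_pos_of_qual s hq
      rw [pvLens_cons_pos s rest hq]
      simp only [isAllStringsSameLengthGo, pvQual_iff, hq, if_true]
      rw [pvMain_pos rest (PySem.Str.len s) hpos]
      rw [List.isEmpty_cons]
      simp [pvMinMax_iff]
    · rw [Bool.not_eq_true] at hq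
      rw [pvLens_cons_neg s rest hq]
      simp only [isAllStringsSameLengthGo, pvQual_iff, hq, if_false, Bool.false_eq_true]
      exact ih
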